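-- pv_equiv track=rewrite | github.com/DhawalV1/competitiveCoding | 1716-calculate-money-in-leetcode-bank/1716-calculate-money-in-leetcode-bank.py | totalMoney
-- ===== SOURCE A (Python) =====
-- def totalMoney(n: int) -> int:
--
--     m = n//7
--
--     if n<8:
--         return n*(n+1)//2
--
--     l = 28*m+7*(m*(m-1)//2)
--     i = 7*m
--     while i<n:
--         l += m+1
--         m += 1
--         i += 1
--
--     return int(l)
-- ===== SOURCE B (Python) =====
-- def totalMoney(n: int) -> int:
--     if n < 8:
--         return n * (n + 1) // 2
--     m, r = divmod(n, 7)
--     return 7 * m * (m + 7) // 2 + r * m + r * (r + 1) // 2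
-- ===== Notes on version B (the rewrite author's own statement) =====
-- stated objective: simpler
-- what changed: Replaces A's full-week formula plus a stateful remainder while-loop with a single loop-free closed form over the quotient and remainder of n by the week length, keeping A's small-n triangular guard.
import Mathlib
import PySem

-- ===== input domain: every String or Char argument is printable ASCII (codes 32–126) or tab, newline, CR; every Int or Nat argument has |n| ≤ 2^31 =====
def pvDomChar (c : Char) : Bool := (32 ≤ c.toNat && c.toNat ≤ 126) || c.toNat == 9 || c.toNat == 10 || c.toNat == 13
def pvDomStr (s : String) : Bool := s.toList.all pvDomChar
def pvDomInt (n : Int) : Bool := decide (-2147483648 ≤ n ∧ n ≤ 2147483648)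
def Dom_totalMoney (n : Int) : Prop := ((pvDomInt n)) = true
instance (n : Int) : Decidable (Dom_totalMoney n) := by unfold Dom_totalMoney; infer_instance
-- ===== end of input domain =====

-- B replaces A's full-week formula plus stateful remainder while-loop with a single loop-free
-- closed form over divmod(n,7) (objective: simpler); same return value everywhere.

-- ===== PORT A =====
-- A's while-loop: while i < n: l += m+1; m += 1; i += 1
def totalMoneyLoop (n l m i : Int) : Int :=
  if i < n then totalMoneyLoop n (l + (m + 1)) (m + 1) (i + 1) else l
termination_by (n - i).toNat
decreasing_by simp_wf; omega

def totalMoney (n : Int) : Int :=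
  let m := PySem.Int.floordiv n 7
  if n < 8 then PySem.Int.floordiv (n * (n + 1)) 2
  else
    let l := 28 * m + 7 * PySem.Int.floordiv (m * (m - 1)) 2
    let i := 7 * m
    totalMoneyLoop n l m i

-- ===== PORT B =====
def totalMoney_alt (n : Int) : Int :=
  if n < 8 then PySem.Int.floordiv (n * (n + 1)) 2
  else
    let m := PySem.Int.floordiv n 7
    let r := PySem.Int.mod n 7
    PySem.Int.floordiv (7 * m * (m + 7)) 2 + r * m + PySem.Int.floordiv (r * (r + 1)) 2

-- ===== PRECONDITION & SPEC =====
def Spec_totalMoney (n : Int) (out : Int) : Prop := out = totalMoney_alt n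
instance (n : Int) (out : Int) : Decidable (Spec_totalMoney n out) := by unfold Spec_totalMoney; infer_instance

-- ===== CLAIM (what is proved, stated in full; the proofs are below) =====
def Claim_equal_totalMoney : Prop := ∀ (n : Int), Dom_totalMoney n → Spec_totalMoney n (totalMoney n)

-- ===== LEMMAS AND PROOFS =====

-- exact halving: floor division of an even integer by 2 is exact
theorem pvHalfEv (x : Int) (h : Even x) : 2 * PySem.Int.floordiv x 2 = x := by
  obtain ⟨k, hk⟩ := h
  have h2 : x = 2 * k := by omega
  rw [PySem.Int.floordiv_eq_ediv_of_pos (by norm_num), h2, Int.mul_ediv_cancel_left k (by norm_num)]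

-- A's remainder loop adds m+1, m+2, …, m+c where c = n - i
theorem pvLoop (c : Nat) : ∀ (n l m i : Int), n - i = (c : Int) →
    totalMoneyLoop n l m i = l + (c : Int) * m + PySem.Int.floordiv ((c : Int) * ((c : Int) + 1)) 2 := by
  induction c with
  | zero =>
      intro n l m i hc
      rw [totalMoneyLoop, if_neg (by omega)]
      simp [PySem.Int.floordiv]
  | succ c ih =>
      intro n l m i hc
      rw [totalMoneyLoop, if_pos (by push_cast at hc ⊢; omega)]
      rw [ih n (l + (m + 1)) (m + 1) (i + 1) (by push_cast at hc ⊢; omega)]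
      have h1 := pvHalfEv ((c : Int) * ((c : Int) + 1)) (Int.even_mul_succ_self (c : Int))
      have h2 := pvHalfEv (((c : Nat) + 1 : Int) * (((c : Nat) + 1 : Int) + 1))
        (Int.even_mul_succ_self ((c : Nat) + 1 : Int))
      push_cast at h2 ⊢
      nlinarith [h1, h2]

-- ===== VERDICT (by name: the statement is the Claim_ definition above) =====
theorem totalMoney_spec : Claim_equal_totalMoney := by
  intro n _
  unfold Spec_totalMoney totalMoney totalMoney_alt
  by_cases h : n < 8
  · simp [h]
  · simp only [h, if_false]
    have hn : 0 ≤ n := by omega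
    have h7 : PySem.Int.floordiv n 7 = n / 7 := PySem.Int.floordiv_eq_ediv_of_pos (by norm_num)
    have hm7 : PySem.Int.mod n 7 = n % 7 := PySem.Int.mod_eq_emod_of_pos (by norm_num)
    rw [h7, hm7]
    set q := n / 7 with hq
    set r := n % 7 with hr
    have hqr : n = 7 * q + r := by omega
    have hr0 : 0 ≤ r := by omega
    have hc : ((r.toNat : Int)) = r := by omega
    rw [pvLoop r.toNat n _ q (7 * q) (by omega)]
    rw [hc]
    have h1 := pvHalfEv (q * (q - 1)) (by
      obtain ⟨k, hk⟩ := Int.even_mul_succ_self (q - 1)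
      exact ⟨k, by nlinarith [hk]⟩)
    have h2 := pvHalfEv (7 * q * (q + 7)) (by
      obtain ⟨k, hk⟩ := Int.even_mul_succ_self q
      exact ⟨21 * q + 7 * k, by nlinarith [hk]⟩)
    have h3 := pvHalfEv (r * (r + 1)) (Int.even_mul_succ_self r)
    nlinarith [h1, h2, h3]
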